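-- pv_equiv track=rewrite | github.com/Andrewvvvw/AOIS4 | lab2/src/zhegalkin.py | _mobius_transform
-- ===== SOURCE A (Python) =====
-- def _mobius_transform(values: list[int]) -> list[int]:
--     transformed = values.copy()
--     if not transformed:
--         return transformed
--
--     variable_count = (len(transformed) - 1).bit_length()
--     for bit in range(variable_count):
--         bit_mask = 1 << bit
--         for index in range(len(transformed)):
--             if index & bit_mask:
--                 transformed[index] ^= transformed[index ^ bit_mask]
--     return transformed
-- ===== SOURCE B (Python) =====
-- def _mobius_transform(values: list[int]) -> list[int]:
--     n = len(values)
--     result = []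
--     for i in range(n):
--         acc = 0
--         for j in range(n):
--             if j & i == j:
--                 acc ^= values[j]
--         result.append(acc)
--     return result
-- ===== Notes on version B (the rewrite author's own statement) =====
-- stated objective: simpler
-- what changed: Replaces the in-place log-n XOR-butterfly passes with the direct definition of the Moebius transform: result[i] is the XOR of values[j] over all submasks j of i (j & i == j), collected into a fresh list.
import Mathlib
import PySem

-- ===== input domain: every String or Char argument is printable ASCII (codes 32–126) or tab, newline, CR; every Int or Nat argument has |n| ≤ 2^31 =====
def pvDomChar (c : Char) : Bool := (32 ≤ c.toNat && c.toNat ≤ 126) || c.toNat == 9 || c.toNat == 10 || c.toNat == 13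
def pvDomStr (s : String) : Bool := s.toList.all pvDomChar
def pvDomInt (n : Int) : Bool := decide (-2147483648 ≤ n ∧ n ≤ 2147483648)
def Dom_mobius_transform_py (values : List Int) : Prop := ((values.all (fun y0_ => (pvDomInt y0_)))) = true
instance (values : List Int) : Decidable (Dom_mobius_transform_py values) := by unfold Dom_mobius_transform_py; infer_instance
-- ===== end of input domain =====

-- B replaces A's in-place XOR-butterfly passes with the direct submask-XOR definition (simpler; not faster).

-- ===== PORT A =====
-- one body of the inner `for index in range(len(transformed))` loop
def pvPassStep (m : Nat) (t : List Int) (i : Nat) : List Int :=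
  if i &&& m ≠ 0 then
    t.set i (PySem.Int.bxor (t.getD i 0) (t.getD (i ^^^ m) 0))
  else t

-- one pass of the outer loop, for bit_mask m
def pvPass (t : List Int) (m : Nat) : List Int :=
  (List.range t.length).foldl (pvPassStep m) t

def mobius_transform_py (values : List Int) : List Int :=
  let transformed := values
  if transformed.isEmpty then transformed
  else
    let variable_count := PySem.Int.bitLength ((transformed.length : Int) - 1)
    (List.range variable_count).foldl (fun t bit => pvPass t (1 <<< bit)) transformed

-- ===== PORT B =====
-- acc = XOR of values[j] over submasks j of i
def pvSubsetXor (values : List Int) (i : Nat) : Int :=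
  (List.range values.length).foldl
    (fun acc j => if j &&& i == j then PySem.Int.bxor acc (values.getD j 0) else acc) 0

def mobius_transform_py_alt (values : List Int) : List Int :=
  (List.range values.length).map (fun i => pvSubsetXor values i)

-- ===== PRECONDITION & SPEC =====
def Spec_mobius_transform_py (values : List Int) (out : List Int) : Prop := out = mobius_transform_py_alt values
instance (values : List Int) (out : List Int) : Decidable (Spec_mobius_transform_py values out) := by unfold Spec_mobius_transform_py; infer_instance

-- ===== CLAIM (what is proved, stated in full; the proofs are below) =====
def Claim_equal_mobius_transform_py : Prop := ∀ (values : List Int), Dom_mobius_transform_py values → Spec_mobius_transform_py values (mobius_transform_py values)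

-- ===== LEMMAS AND PROOFS =====

-- Int xor via a (sign, magnitude) encoding, to get assoc/comm/identities
def pvEnc (a : Int) : Bool × Nat := (decide (a < 0), if 0 ≤ a then a.toNat else (-a - 1).toNat)
def pvDec (p : Bool × Nat) : Int := if p.1 then -(p.2 : Int) - 1 else (p.2 : Int)

theorem pvBxor_eq (a b : Int) :
    PySem.Int.bxor a b = pvDec (xor (pvEnc a).1 (pvEnc b).1, (pvEnc a).2 ^^^ (pvEnc b).2) := by
  unfold PySem.Int.bxor pvEnc pvDec
  split_ifs <;> simp_all <;> omega

theorem pvEnc_dec (p : Bool × Nat) : pvEnc (pvDec p) = p := by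
  obtain ⟨s, m⟩ := p
  unfold pvEnc pvDec
  cases s <;> simp <;> omega

theorem pvBxor_assoc (a b c : Int) :
    PySem.Int.bxor (PySem.Int.bxor a b) c = PySem.Int.bxor a (PySem.Int.bxor b c) := by
  simp only [pvBxor_eq, pvEnc_dec]
  simp [Nat.xor_assoc]

theorem pvBxor_comm (a b : Int) : PySem.Int.bxor a b = PySem.Int.bxor b a := by
  simp only [pvBxor_eq]
  simp [Bool.xor_comm, Nat.xor_comm]

theorem pvBxor_zero_left (a : Int) : PySem.Int.bxor 0 a = a := by
  rw [pvBxor_comm]; exact PySem.Int.bxor_zero a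

-- XOR-fold over a list of indices selected by a predicate
def pvG (v : List Int) (L : List Nat) (p : Nat → Bool) (a : Int) : Int :=
  L.foldl (fun acc j => if p j then PySem.Int.bxor acc (v.getD j 0) else acc) a

theorem pvSubsetXor_eq_pvG (v : List Int) (i : Nat) :
    pvSubsetXor v i = pvG v (List.range v.length) (fun j => j &&& i == j) 0 := rfl

theorem pvG_congr (v : List Int) (L : List Nat) (p q : Nat → Bool) (a : Int)
    (h : ∀ j ∈ L, p j = q j) : pvG v L p a = pvG v L q a := by
  induction L generalizing a with
  | nil => rfl
  | cons x xs ih =>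
    simp only [pvG, List.foldl_cons] at *
    rw [h x (by simp)]
    exact ih _ (fun j hj => h j (by simp [hj]))

theorem pvG_single (v : List Int) (n k : Nat) (hk : k < n) :
    pvG v (List.range n) (fun j => j == k) 0 = v.getD k 0 := by
  have hcount : ∀ (L : List Nat) (a : Int),
      pvG v L (fun j => j == k) a =
      (List.replicate (L.count k) k).foldl (fun acc _ => PySem.Int.bxor acc (v.getD k 0)) a := by
    intro L
    induction L with
    | nil => intro a; simp [pvG]
    | cons x xs ih =>
      intro a
      simp only [pvG, List.foldl_cons] at *
      by_cases hx : x = k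
      · subst hx
        have hc : List.count x (x :: xs) = List.count x xs + 1 := by
          simp
        rw [hc, List.replicate_succ, List.foldl_cons,
          if_pos (show (x == x) = true by simp)]
        exact ih _
      · have hc : List.count k (x :: xs) = List.count k xs := by
          simp [hx]
        rw [hc, if_neg (show ¬((x == k) = true) by simp [hx])]
        exact ih _
  rw [hcount]
  simp [List.count_range, hk, pvBxor_zero_left]

theorem pvG_disjoint (v : List Int) (L : List Nat) (p q : Nat → Bool)
    (hd : ∀ j ∈ L, ¬(p j = true ∧ q j = true)) (a b : Int) :
    pvG v L (fun j => p j || q j) (PySem.Int.bxor a b) =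
      PySem.Int.bxor (pvG v L p a) (pvG v L q b) := by
  induction L generalizing a b with
  | nil => rfl
  | cons x xs ih =>
    have hd' : ∀ j ∈ xs, ¬(p j = true ∧ q j = true) := fun j hj => hd j (by simp [hj])
    have hstep : ∀ (r : Nat → Bool) (c : Int), pvG v (x :: xs) r c =
        pvG v xs r (if r x then PySem.Int.bxor c (v.getD x 0) else c) := fun r c => rfl
    rw [hstep, hstep, hstep]
    by_cases hp : p x = true
    · have hq : q x = false := by
        have := hd x (by simp); cases hqq : q x
        · rfl
        · exact absurd ⟨hp, hqq⟩ this
      rw [if_pos (show (p x || q x) = true by simp [hp]), if_pos hp,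
        if_neg (show ¬(q x = true) by simp [hq])]
      rw [show PySem.Int.bxor (PySem.Int.bxor a b) (v.getD x 0) =
          PySem.Int.bxor (PySem.Int.bxor a (v.getD x 0)) b by
        rw [pvBxor_assoc, pvBxor_assoc, pvBxor_comm b]]
      exact ih hd' _ _
    · by_cases hq : q x = true
      · rw [if_pos (show (p x || q x) = true by simp [hq]), if_neg hp, if_pos hq,
          pvBxor_assoc]
        exact ih hd' _ _
      · rw [if_neg (show ¬((p x || q x) = true) by simp [hp, hq]), if_neg hp, if_neg hq]
        exact ih hd' _ _

-- submask / high-bits predicate: low b bits of j are a submask of i, high bits agree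
def pvC (b i j : Nat) : Bool := ((j % 2 ^ b) &&& i == j % 2 ^ b) && (j / 2 ^ b == i / 2 ^ b)

theorem pvAnd_eq_iff (x y : Nat) :
    (x &&& y == x) = true ↔ ∀ t, x.testBit t = true → y.testBit t = true := by
  simp only [beq_iff_eq]
  constructor
  · intro h t ht
    have h2 := congrArg (fun z => z.testBit t) h
    simp only [Nat.testBit_and] at h2
    rw [ht] at h2
    simpa using h2
  · intro h
    apply Nat.eq_of_testBit_eq
    intro t
    rw [Nat.testBit_and]
    cases hx : x.testBit t
    · simp
    · simp [h t hx]

theorem pvDiv_eq_iff (b i j : Nat) :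
    (j / 2 ^ b == i / 2 ^ b) = true ↔ ∀ t, b ≤ t → j.testBit t = i.testBit t := by
  simp only [beq_iff_eq]
  constructor
  · intro h t hbt
    obtain ⟨u, rfl⟩ := Nat.exists_eq_add_of_le hbt
    have h1 := Nat.testBit_shiftRight (i := b) (j := u) j
    have h2 := Nat.testBit_shiftRight (i := b) (j := u) i
    rw [Nat.shiftRight_eq_div_pow] at h1 h2
    rw [← h1, ← h2, h]
  · intro h
    rw [← Nat.shiftRight_eq_div_pow, ← Nat.shiftRight_eq_div_pow]
    apply Nat.eq_of_testBit_eq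
    intro u
    rw [Nat.testBit_shiftRight, Nat.testBit_shiftRight]
    exact h _ (Nat.le_add_right _ _)

theorem pvC_iff (b i j : Nat) :
    pvC b i j = true ↔
      ((∀ t, t < b → j.testBit t = true → i.testBit t = true) ∧
       (∀ t, b ≤ t → j.testBit t = i.testBit t)) := by
  unfold pvC
  rw [Bool.and_eq_true, pvAnd_eq_iff, pvDiv_eq_iff]
  constructor
  · rintro ⟨h1, h2⟩
    refine ⟨fun t htb hjt => ?_, h2⟩
    exact h1 t (by simp [Nat.testBit_mod_two_pow, htb, hjt])
  · rintro ⟨h1, h2⟩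
    refine ⟨fun t ht => ?_, h2⟩
    rw [Nat.testBit_mod_two_pow, Bool.and_eq_true] at ht
    exact h1 t (by simpa using ht.1) ht.2

theorem pvC_zero (i j : Nat) : pvC 0 i j = (j == i) := by
  unfold pvC
  simp only [pow_zero, Nat.mod_one, Nat.div_one]
  simp

theorem pvC_final (v i j : Nat) (hi : i < 2 ^ v) (hj : j < 2 ^ v) :
    pvC v i j = (j &&& i == j) := by
  unfold pvC
  rw [Nat.mod_eq_of_lt hj, Nat.div_eq_of_lt hj, Nat.div_eq_of_lt hi]
  simp

theorem pvC_high (b i j : Nat) (h : pvC b i j = true) (t : Nat) (ht : b ≤ t) :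
    j.testBit t = i.testBit t := ((pvC_iff b i j).mp h).2 t ht

-- stepping a pass: case bit b of i clear
theorem pvC_step_false (b i j : Nat) (hib : i.testBit b = false) :
    pvC (b + 1) i j = pvC b i j := by
  rw [Bool.eq_iff_iff, pvC_iff, pvC_iff]
  constructor
  · rintro ⟨h1, h2⟩
    refine ⟨fun t ht hjt => h1 t (by omega) hjt, fun t ht => ?_⟩
    rcases Nat.lt_or_ge t (b + 1) with h | h
    · have htb : t = b := by omega
      subst htb
      cases hjt : j.testBit t
      · rw [hib]
      · exact absurd (h1 t (by omega) hjt) (by simp [hib])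
    · exact h2 t h
  · rintro ⟨h1, h2⟩
    refine ⟨fun t ht hjt => ?_, fun t ht => h2 t (by omega)⟩
    rcases Nat.lt_or_ge t b with h | h
    · exact h1 t h hjt
    · have htb : t = b := by omega
      subst htb
      rw [h2 t (le_refl _)] at hjt
      exact hjt

-- stepping a pass: case bit b of i set — splits into the two disjoint halves
theorem pvC_step_true (b i j : Nat) (hib : i.testBit b = true) :
    pvC (b + 1) i j = (pvC b i j || pvC b (i ^^^ 2 ^ b) j) := by
  have hflip : ∀ u, (i ^^^ 2 ^ b).testBit u = if u = b then !i.testBit b else i.testBit u := by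
    intro u
    rw [Nat.testBit_xor, Nat.testBit_two_pow]
    by_cases h : u = b
    · simp [h]
    · have hb : ¬b = u := fun hh => h hh.symm
      simp [h, hb]
  rw [Bool.eq_iff_iff, pvC_iff, Bool.or_eq_true, pvC_iff, pvC_iff]
  constructor
  · rintro ⟨h1, h2⟩
    cases hjb : j.testBit b
    · right
      refine ⟨fun u hu hju => ?_, fun u hu => ?_⟩
      · rw [hflip u, if_neg (by omega)]
        exact h1 u (by omega) hju
      · rcases Nat.lt_or_ge u (b + 1) with h | h
        · have hub : u = b := by omega
          subst hub
          rw [hflip u, if_pos rfl, hib, hjb]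
          rfl
        · rw [hflip u, if_neg (by omega)]
          exact h2 u h
    · left
      refine ⟨fun u hu hju => h1 u (by omega) hju, fun u hu => ?_⟩
      rcases Nat.lt_or_ge u (b + 1) with h | h
      · have hub : u = b := by omega
        subst hub
        rw [hjb, hib]
      · exact h2 u h
  · rintro (⟨h1, h2⟩ | ⟨h1, h2⟩)
    · refine ⟨fun u hu hju => ?_, fun u hu => h2 u (by omega)⟩
      rcases Nat.lt_or_ge u b with h | h
      · exact h1 u h hju
      · have hub : u = b := by omega
        subst hub
        exact hib
    · refine ⟨fun u hu hju => ?_, fun u hu => ?_⟩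
      · rcases Nat.lt_or_ge u b with h | h
        · have := h1 u h hju
          rw [hflip u, if_neg (by omega)] at this
          exact this
        · have hub : u = b := by omega
          subst hub
          have := h2 u (le_refl _)
          rw [hflip u, if_pos rfl, hib] at this
          rw [hju] at this
          simp at this
      · have := h2 u (by omega)
        rw [hflip u, if_neg (by omega)] at this
        exact this

theorem pvC_disjoint (b i j : Nat) (hib : i.testBit b = true) :
    ¬(pvC b i j = true ∧ pvC b (i ^^^ 2 ^ b) j = true) := by
  rintro ⟨h1, h2⟩
  have e1 := pvC_high b i j h1 b (le_refl _)
  have e2 := pvC_high b (i ^^^ 2 ^ b) j h2 b (le_refl _)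
  rw [Nat.testBit_xor, Nat.testBit_two_pow] at e2
  simp [hib] at e1 e2
  rw [e1] at e2
  exact absurd e2 (by simp)

-- the inner pass, characterised entrywise
theorem pvAnd_two_pow_ne (i b : Nat) : (i &&& 2 ^ b ≠ 0) ↔ i.testBit b = true := by
  rw [Nat.and_two_pow]
  cases h : i.testBit b
  · simp
  · simp

theorem pvXor_two_pow_lt (i b : Nat) (h : i.testBit b = true) : i ^^^ 2 ^ b < i := by
  apply Nat.lt_of_testBit b
  · rw [Nat.testBit_xor, Nat.testBit_two_pow, h]; simp
  · exact h
  · intro t ht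
    rw [Nat.testBit_xor, Nat.testBit_two_pow]
    have hbt : ¬b = t := by omega
    simp [hbt]

theorem pvXor_two_pow_clear (i b : Nat) (h : i.testBit b = true) :
    (i ^^^ 2 ^ b).testBit b = false := by
  rw [Nat.testBit_xor, Nat.testBit_two_pow, h]; simp

theorem pvPass_aux (b : Nat) (t : List Int) (k : Nat) (hk : k ≤ t.length) :
    ((List.range k).foldl (pvPassStep (2 ^ b)) t).length = t.length ∧
    ∀ i, ((List.range k).foldl (pvPassStep (2 ^ b)) t).getD i 0 =
      if i < k ∧ i.testBit b = true then
        PySem.Int.bxor (t.getD i 0) (t.getD (i ^^^ 2 ^ b) 0)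
      else t.getD i 0 := by
  induction k with
  | zero =>
    refine ⟨rfl, fun i => ?_⟩
    simp only [List.range_zero, List.foldl_nil]
    rw [if_neg (by rintro ⟨h, _⟩; omega)]
  | succ k ih =>
    obtain ⟨ihlen, ihget⟩ := ih (by omega)
    rw [List.range_succ, List.foldl_append, List.foldl_cons, List.foldl_nil]
    generalize (List.range k).foldl (pvPassStep (2 ^ b)) t = s at ihlen ihget ⊢
    unfold pvPassStep
    by_cases hkb : k.testBit b = true
    · rw [if_pos (by rw [pvAnd_two_pow_ne]; exact hkb)]
      have hsk : s.getD k 0 = t.getD k 0 := by rw [ihget]; simp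
      have hskm : s.getD (k ^^^ 2 ^ b) 0 = t.getD (k ^^^ 2 ^ b) 0 := by
        rw [ihget]
        rw [if_neg]
        rintro ⟨_, hh⟩
        rw [pvXor_two_pow_clear k b hkb] at hh
        exact absurd hh (by simp)
      constructor
      · rw [List.length_set, ihlen]
      · intro i
        have hget : (s.set k (PySem.Int.bxor (s.getD k 0) (s.getD (k ^^^ 2 ^ b) 0))).getD i 0 =
            if i = k then PySem.Int.bxor (s.getD k 0) (s.getD (k ^^^ 2 ^ b) 0)
            else s.getD i 0 := by
          by_cases hik : i = k
          · subst hik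
            rw [List.getD_eq_getElem _ _ (by simp only [List.length_set, ihlen]; omega)]
            rw [if_pos rfl]
            rw [List.getElem_set_self (by simp only [List.length_set, ihlen]; omega)]
          · rw [if_neg hik]
            by_cases hil : i < s.length
            · rw [List.getD_eq_getElem _ _ (by simp only [List.length_set]; exact hil),
                List.getD_eq_getElem _ _ hil,
                List.getElem_set_ne (fun h => hik h.symm)]
            · rw [List.getD_eq_default, List.getD_eq_default]
              · omega
              · rw [List.length_set]; omega
        rw [hget]
        by_cases hik : i = k
        · subst hik
          rw [if_pos rfl, if_pos ⟨by omega, hkb⟩, hsk, hskm]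
        · rw [if_neg hik, ihget]
          by_cases hc : i < k ∧ i.testBit b = true
          · rw [if_pos hc, if_pos ⟨by omega, hc.2⟩]
          · rw [if_neg hc, if_neg (by rintro ⟨h1, h2⟩; exact hc ⟨by omega, h2⟩)]
    · have hkb' : k.testBit b = false := by simpa using hkb
      rw [if_neg (show ¬(k &&& 2 ^ b ≠ 0) by simp [Nat.and_two_pow, hkb'])]
      refine ⟨ihlen, fun i => ?_⟩
      rw [ihget]
      by_cases hc : i < k ∧ i.testBit b = true
      · rw [if_pos hc, if_pos ⟨by omega, hc.2⟩]
      · rw [if_neg hc, if_neg]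
        rintro ⟨h1, h2⟩
        rcases Nat.lt_or_ge i k with h | h
        · exact hc ⟨h, h2⟩
        · have : i = k := by omega
          subst this
          exact hkb h2
      
theorem pvPass_length (t : List Int) (b : Nat) : (pvPass t (2 ^ b)).length = t.length :=
  (pvPass_aux b t t.length (le_refl _)).1

theorem pvPass_getD (t : List Int) (b i : Nat) (hi : i < t.length) :
    (pvPass t (2 ^ b)).getD i 0 =
      if i.testBit b = true then PySem.Int.bxor (t.getD i 0) (t.getD (i ^^^ 2 ^ b) 0)
      else t.getD i 0 := by
  have := (pvPass_aux b t t.length (le_refl _)).2 i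
  unfold pvPass
  rw [this]
  by_cases h : i.testBit b = true <;> simp [h, hi]

-- outer loop and its invariant
def pvOuter (v : List Int) (b : Nat) : List Int :=
  (List.range b).foldl (fun t bit => pvPass t (1 <<< bit)) v

theorem pvOuter_succ (v : List Int) (b : Nat) :
    pvOuter v (b + 1) = pvPass (pvOuter v b) (2 ^ b) := by
  unfold pvOuter
  rw [List.range_succ, List.foldl_append, List.foldl_cons, List.foldl_nil, Nat.one_shiftLeft]

theorem pvInv (v : List Int) (b : Nat) :
    (pvOuter v b).length = v.length ∧
    ∀ i, i < v.length → (pvOuter v b).getD i 0 = pvG v (List.range v.length) (pvC b i) 0 := by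
  induction b with
  | zero =>
    refine ⟨rfl, fun i hi => ?_⟩
    have : pvG v (List.range v.length) (pvC 0 i) 0 =
        pvG v (List.range v.length) (fun j => j == i) 0 :=
      pvG_congr _ _ _ _ _ (fun j _ => pvC_zero i j)
    rw [this, pvG_single v v.length i hi]
    rfl
  | succ b ih =>
    obtain ⟨ihlen, ihget⟩ := ih
    rw [pvOuter_succ]
    refine ⟨by rw [pvPass_length, ihlen], fun i hi => ?_⟩
    rw [pvPass_getD _ b i (by rw [ihlen]; exact hi)]
    by_cases hib : i.testBit b = true
    · rw [if_pos hib]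
      have hflt : i ^^^ 2 ^ b < v.length := lt_trans (pvXor_two_pow_lt i b hib) hi
      rw [ihget i hi, ihget _ hflt]
      have hsplit : pvG v (List.range v.length) (pvC (b + 1) i) 0 =
          pvG v (List.range v.length) (fun j => pvC b i j || pvC b (i ^^^ 2 ^ b) j) 0 :=
        pvG_congr _ _ _ _ _ (fun j _ => pvC_step_true b i j hib)
      have hdisj := pvG_disjoint v (List.range v.length) (pvC b i) (pvC b (i ^^^ 2 ^ b))
        (fun j _ => pvC_disjoint b i j hib) 0 0
      rw [PySem.Int.bxor_zero] at hdisj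
      rw [hsplit, ← hdisj]
    · rw [if_neg hib, ihget i hi]
      exact (pvG_congr _ _ _ _ _ (fun j _ => (pvC_step_false b i j (by simpa using hib)).symm))

-- the final assembly
theorem pvMain (v : List Int) : mobius_transform_py v = mobius_transform_py_alt v := by
  by_cases hv : v.isEmpty
  · have : v = [] := List.isEmpty_iff.mp hv
    subst this
    rfl
  · have hvne : v ≠ [] := fun h => hv (by simp [h])
    have hlen : 0 < v.length := List.length_pos_iff.mpr hvne
    set vc := PySem.Int.bitLength ((v.length : Int) - 1) with hvc
    have hA : mobius_transform_py v = pvOuter v vc := by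
      unfold mobius_transform_py pvOuter
      rw [if_neg (by simp [hv])]
    have hbound : v.length - 1 < 2 ^ vc := by
      have := PySem.Int.lt_two_pow_bitLength ((v.length : Int) - 1)
      rw [← hvc] at this
      have hnat : ((v.length : Int) - 1).natAbs = v.length - 1 := by omega
      omega
    obtain ⟨hAlen, hAget⟩ := pvInv v vc
    rw [hA]
    apply List.ext_getElem
    · rw [hAlen]
      simp [mobius_transform_py_alt]
    · intro i h1 h2
      have hi : i < v.length := by rwa [hAlen] at h1
      have hgetD : (pvOuter v vc)[i] = (pvOuter v vc).getD i 0 :=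
        (List.getD_eq_getElem _ _ h1).symm
      rw [hgetD, hAget i hi]
      have hB : (mobius_transform_py_alt v)[i] = pvSubsetXor v i := by
        simp [mobius_transform_py_alt]
      rw [hB, pvSubsetXor_eq_pvG]
      apply pvG_congr
      intro j hj
      have hjn : j < v.length := List.mem_range.mp hj
      exact pvC_final vc i j (by omega) (by omega)

-- ===== VERDICT (by name: the statement is the Claim_ definition above) =====
theorem mobius_transform_py_spec : Claim_equal_mobius_transform_py := by
  intro values _
  unfold Spec_mobius_transform_py
  exact pvMain values
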